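-- pv_equiv track=rewrite | github.com/shaojun427/idcard-ocr | src/idcard_ocr/inference/parser.py | _label_match_length
-- ===== SOURCE A (Python) =====
-- def _label_match_length(text: str, label: str, tolerance: int) -> int | None:
--     if len(text) < len(label):
--         return None
--     prefix = text[: len(label)]
--     if prefix == label:
--         return len(label)
--     if tolerance <= 0:
--         return None
--     distance = sum(1 for left, right in zip(prefix, label) if left != right)
--     if distance <= tolerance:
--         return len(label)
--     return None
-- ===== SOURCE B (Python) =====
-- def _match_run(a, b, i, n):
--     k = 0
--     while i + k < n and a[i + k] == b[i + k]:
--         k += 1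
--     return k
--
--
-- def _label_match_length(text: str, label: str, tolerance: int) -> int | None:
--     n = len(label)
--     if len(text) < n:
--         return None
--     budget = tolerance if tolerance > 0 else 0
--     i = 0
--     while True:
--         i += _match_run(text, label, i, n)
--         if i == n:
--             return n
--         if budget == 0:
--             return None
--         budget -= 1
--         i += 1
-- ===== Notes on version B (the rewrite author's own statement) =====
-- stated objective: alternative
-- what changed: Replaces A's prefix-equality check plus full mismatch-count pass with a run-skipping loop: a helper measures each maximal run of matching characters and the outer loop iterates once per mismatch, spending one unit of a max(tolerance,0) budget each time.
import Mathlib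
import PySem

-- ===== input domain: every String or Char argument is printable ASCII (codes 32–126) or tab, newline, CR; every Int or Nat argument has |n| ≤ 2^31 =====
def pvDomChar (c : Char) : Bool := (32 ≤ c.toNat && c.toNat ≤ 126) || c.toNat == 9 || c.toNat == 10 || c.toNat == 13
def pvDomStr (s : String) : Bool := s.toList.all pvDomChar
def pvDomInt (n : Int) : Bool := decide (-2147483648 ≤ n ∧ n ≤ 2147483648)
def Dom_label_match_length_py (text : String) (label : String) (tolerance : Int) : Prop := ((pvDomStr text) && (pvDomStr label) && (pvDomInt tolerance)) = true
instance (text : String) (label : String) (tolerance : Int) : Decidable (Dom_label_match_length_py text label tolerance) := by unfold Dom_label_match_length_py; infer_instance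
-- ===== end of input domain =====

-- B replaces A's prefix-equality check plus full mismatch-count pass with a run-skipping
-- loop: a helper measures each maximal run of matching characters and the outer loop
-- iterates once per mismatch, spending one unit of a max(tolerance,0) budget (objective: alternative).

-- ===== PORT A =====
-- Literal transliteration of A: length guard, prefix slice, equality check,
-- tolerance guard, then a full mismatch count over zip(prefix, label).
def label_match_length_py (text : String) (label : String) (tolerance : Int) : Option Int :=
  let t := text.toList
  let l := label.toList
  if (t.length : Int) < (l.length : Int) then none
  else
    let prefix_ := t.take l.length          -- text[: len(label)]
    if prefix_ = l then some (l.length : Int)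
    else if tolerance ≤ 0 then none
    else
      let distance : Int := (((prefix_.zip l).filter (fun p => p.1 ≠ p.2)).length : Int)
      if distance ≤ tolerance then some (l.length : Int) else none

-- ===== PORT B =====
-- B's helper _match_run: length of the matching run a[i+k]==b[i+k] starting at offset k.
-- Python indexes a[i+k], b[i+k] only under the guard i+k < n <= len, so getD is exact here.
-- The fuel argument only makes the while-loop total (n is always enough: k stays below n).
def matchRun (a b : List Char) (n i : Nat) : Nat → Nat → Nat
  | 0, k => k
  | fuel + 1, k =>
    if i + k < n ∧ a.getD (i + k) ' ' = b.getD (i + k) ' ' then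
      matchRun a b n i fuel (k + 1)
    else k

-- B's outer loop: skip the matching run; if it reaches n return n, else spend one budget
-- unit on the mismatch and continue one past it.  The fuel argument only makes the
-- while-loop total (n + 1 is always enough: i strictly increases and stays <= n).
def bLoop (a b : List Char) (n : Nat) : Nat → Nat → Int → Option Int
  | 0, _, _ => none
  | fuel + 1, i, budget =>
    if i + matchRun a b n i n 0 = n then some (n : Int)
    else if budget = 0 then none
    else bLoop a b n fuel (i + matchRun a b n i n 0 + 1) (budget - 1)

def label_match_length_py_alt (text : String) (label : String) (tolerance : Int) : Option Int :=
  let t := text.toList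
  let l := label.toList
  let n := l.length
  if (t.length : Int) < (n : Int) then none
  else
    let budget := if tolerance > 0 then tolerance else 0
    bLoop t l n (n + 1) 0 budget

-- ===== PRECONDITION & SPEC =====
def Spec_label_match_length_py (text : String) (label : String) (tolerance : Int) (out : Option Int) : Prop := out = label_match_length_py_alt text label tolerance
instance (text : String) (label : String) (tolerance : Int) (out : Option Int) : Decidable (Spec_label_match_length_py text label tolerance out) := by unfold Spec_label_match_length_py; infer_instance

-- ===== CLAIM (what is proved, stated in full; the proofs are below) =====
def Claim_equal_label_match_length_py : Prop := ∀ (text : String) (label : String) (tolerance : Int), Dom_label_match_length_py text label tolerance → Spec_label_match_length_py text label tolerance (label_match_length_py text label tolerance)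

-- ===== LEMMAS AND PROOFS =====

-- Mismatch count of a pair list, as A computes it.
def mcount (pairs : List (Char × Char)) : Int :=
  ((pairs.filter (fun p => p.1 ≠ p.2)).length : Int)

-- Mismatch count of the suffixes from position i.
def mcountFrom (t l : List Char) (i : Nat) : Int :=
  mcount ((t.drop i).zip (l.drop i))

theorem mcount_nonneg (pairs : List (Char × Char)) : 0 ≤ mcount pairs := by
  simp [mcount]

theorem mcount_cons (p : Char × Char) (rest : List (Char × Char)) :
    mcount (p :: rest) = (if p.1 ≠ p.2 then 1 else 0) + mcount rest := by
  by_cases h : p.1 = p.2 <;> simp [mcount, List.filter, h] <;> omega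

theorem mcountFrom_nonneg (t l : List Char) (i : Nat) : 0 ≤ mcountFrom t l i :=
  mcount_nonneg _

-- Peeling one position off the suffix counts.
theorem mcountFrom_step (t l : List Char) (i : Nat)
    (hil : i < l.length) (hit : i < t.length) :
    mcountFrom t l i =
      (if t.getD i ' ' = l.getD i ' ' then 0 else 1) + mcountFrom t l (i + 1) := by
  unfold mcountFrom
  rw [List.drop_eq_getElem_cons hit, List.drop_eq_getElem_cons hil,
      List.zip_cons_cons, mcount_cons,
      List.getD_eq_getElem t ' ' hit, List.getD_eq_getElem l ' ' hil]
  by_cases h : t[i] = l[i] <;> simp [h]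

theorem mcountFrom_end (t l : List Char) : mcountFrom t l l.length = 0 := by
  simp [mcountFrom, mcount]

-- The run skipped by matchRun contributes no mismatches, and it stops either at n
-- or at a mismatching position (whenever the fuel covers the remaining distance).
theorem matchRun_spec (t l : List Char) (n i : Nat)
    (hl : n = l.length) (hn : n ≤ t.length) :
    ∀ fuel k, n - (i + k) ≤ fuel → i + k ≤ n →
      mcountFrom t l (i + k) = mcountFrom t l (i + matchRun t l n i fuel k) ∧
      (i + matchRun t l n i fuel k = n ∨
        (i + matchRun t l n i fuel k < n ∧
          t.getD (i + matchRun t l n i fuel k) ' ' ≠ l.getD (i + matchRun t l n i fuel k) ' ')) := by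
  intro fuel
  induction fuel with
  | zero =>
    intro k h1 h2
    simp only [matchRun]
    exact ⟨trivial, Or.inl (by omega)⟩
  | succ fuel ih =>
    intro k h1 h2
    rw [matchRun]
    split
    · next h =>
      obtain ⟨hlt, heq⟩ := h
      have hstep := mcountFrom_step t l (i + k) (by omega) (by omega)
      rw [if_pos heq, zero_add] at hstep
      have hadd : i + k + 1 = i + (k + 1) := by omega
      rw [hadd] at hstep
      have hih := ih (k + 1) (by omega) (by omega)
      exact ⟨hstep.trans hih.1, hih.2⟩
    · next h =>
      constructor
      · rfl
      · by_cases hkn : i + k = n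
        · exact Or.inl hkn
        · refine Or.inr ⟨by omega, ?_⟩
          intro heq
          exact h ⟨by omega, heq⟩

-- The loop returns some n exactly when the remaining mismatch count fits the budget.
theorem bLoop_eq (t l : List Char) (n : Nat)
    (hl : n = l.length) (hn : n ≤ t.length) :
    ∀ fuel i (budget : Int), i ≤ n → n - i < fuel → 0 ≤ budget →
      bLoop t l n fuel i budget =
        if mcountFrom t l i ≤ budget then some (n : Int) else none := by
  intro fuel
  induction fuel with
  | zero => intro i budget hi h1 hb; omega
  | succ fuel ih =>
    intro i budget hi h1 hb
    rw [bLoop]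
    have hspec := matchRun_spec t l n i hl hn n 0 (by omega) (by omega)
    simp only [Nat.add_zero] at hspec
    obtain ⟨hmc, hstop⟩ := hspec
    by_cases h : i + matchRun t l n i n 0 = n
    · rw [if_pos h]
      have : mcountFrom t l i = 0 := by
        rw [hmc, h, hl]; exact mcountFrom_end t l
      rw [if_pos (by omega)]
    · rw [if_neg h]
      obtain ⟨hlt, hne⟩ := hstop.resolve_left h
      have hstep := mcountFrom_step t l (i + matchRun t l n i n 0) (by omega) (by omega)
      rw [if_neg hne] at hstep
      have hrec := ih (i + matchRun t l n i n 0 + 1) (budget - 1)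
        (by omega) (by omega)
      have hpos := mcountFrom_nonneg t l (i + matchRun t l n i n 0 + 1)
      by_cases hz : budget = 0
      · rw [if_pos hz, if_neg (by omega)]
      · rw [if_neg hz, hrec (by omega)]
        by_cases hle : mcountFrom t l i ≤ budget
        · rw [if_pos (by omega), if_pos hle]
        · rw [if_neg (by omega), if_neg hle]

-- Zipping text with label equals zipping the prefix with label.
theorem zip_take_eq (t l : List Char) : (t.take l.length).zip l = t.zip l := by
  induction t generalizing l with
  | nil => simp
  | cons a t ih =>
    cases l with
    | nil => simp
    | cons b l => simp [List.zip_cons_cons, ih]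

-- For equal-length lists, zero mismatches in the zip means equality.
theorem mcount_zero_iff (xs ys : List Char) (h : xs.length = ys.length) :
    mcount (xs.zip ys) = 0 ↔ xs = ys := by
  induction xs generalizing ys with
  | nil => cases ys with
    | nil => simp [mcount]
    | cons b ys => simp at h
  | cons a xs ih =>
    cases ys with
    | nil => simp at h
    | cons b ys =>
      simp at h
      rw [List.zip_cons_cons, mcount_cons]
      have hnn := mcount_nonneg (xs.zip ys)
      by_cases hab : a = b
      · simp [hab, ih ys h]
      · simp [hab]; omega

-- ===== VERDICT (by name: the statement is the Claim_ definition above) =====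
theorem label_match_length_py_spec : Claim_equal_label_match_length_py := by
  intro text label tolerance _
  unfold Spec_label_match_length_py label_match_length_py label_match_length_py_alt
  set t := text.toList with ht
  set l := label.toList with hl
  by_cases hlen : (t.length : Int) < (l.length : Int)
  · simp [hlen]
  · simp only [hlen, if_false]
    have hle : l.length ≤ t.length := by exact_mod_cast not_lt.mp hlen
    have hplen : (t.take l.length).length = l.length := by
      simp [List.length_take, Nat.min_eq_left hle]
    have hz : (t.take l.length).zip l = t.zip l := zip_take_eq t l
    have hiff := mcount_zero_iff (t.take l.length) l hplen
    have hbnn : (0 : Int) ≤ if tolerance > 0 then tolerance else 0 := by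
      split <;> omega
    have hloop := bLoop_eq t l l.length rfl hle (l.length + 1) 0
      (if tolerance > 0 then tolerance else 0) (Nat.zero_le _) (by omega) hbnn
    have hm0 : mcountFrom t l 0 = mcount ((t.take l.length).zip l) := by
      simp [mcountFrom, hz]
    have hnn := mcount_nonneg ((t.take l.length).zip l)
    by_cases heq : t.take l.length = l
    · have hmz : mcount ((t.take l.length).zip l) = 0 := hiff.mpr heq
      rw [if_pos heq, hloop, hm0, hmz, if_pos hbnn]
    · have hmnz : mcount ((t.take l.length).zip l) ≠ 0 := fun h => heq (hiff.mp h)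
      simp only [heq, if_false]
      by_cases htol : tolerance ≤ 0
      · have hb : (if tolerance > 0 then tolerance else 0) = 0 := by
          rw [if_neg (by omega)]
        rw [if_pos htol, hloop, hb, hm0, if_neg (by omega)]
      · have hb : (if tolerance > 0 then tolerance else 0) = tolerance := by
          rw [if_pos (by omega)]
        rw [if_neg htol, hloop, hb, hm0]
        by_cases hd : mcount ((t.take l.length).zip l) ≤ tolerance
        · have hd' : ((((List.take l.length t).zip l).filter (fun p => p.1 ≠ p.2)).length : Int) ≤ tolerance := by
            show mcount ((List.take l.length t).zip l) ≤ tolerance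
            exact hd
          rw [if_pos hd, if_pos hd']
        · have hd' : ¬ ((((List.take l.length t).zip l).filter (fun p => p.1 ≠ p.2)).length : Int) ≤ tolerance := by
            show ¬ mcount ((List.take l.length t).zip l) ≤ tolerance
            exact hd
          rw [if_neg hd, if_neg hd']
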